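-- pv_equiv track=rewrite | github.com/vereesmort/NNPS | visualize_leakage.py | find_leakage
-- ===== SOURCE A (Python) =====
-- def normalize_pair(pair):
--     """Normalize pair to always have smaller index first"""
--     return tuple(sorted(pair))
--
-- def find_leakage(train, val, test):
--     """Find pairs that appear in multiple splits"""
--     train_normalized = {normalize_pair(p) for p in train}
--     val_normalized = {normalize_pair(p) for p in val}
--     test_normalized = {normalize_pair(p) for p in test}
--
--     train_val_leak = train_normalized & val_normalized
--     train_test_leak = train_normalized & test_normalized
--     val_test_leak = val_normalized & test_normalized
--     all_leak = train_normalized & val_normalized & test_normalized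
--
--     return {
--         'train_val': train_val_leak,
--         'train_test': train_test_leak,
--         'val_test': val_test_leak,
--         'all_splits': all_leak
--     }
-- ===== SOURCE B (Python) =====
-- def find_leakage(train, val, test):
--     """Find pairs that appear in multiple splits"""
--     flags = {}
--     for name, split in (("train", train), ("val", val), ("test", test)):
--         for p in split:
--             k = tuple(sorted(p))
--             flags[k] = flags.get(k, set()) | {name}
--
--     def pick(split, need):
--         out = set()
--         for p in split:
--             if need <= flags[tuple(sorted(p))]:
--                 out.add(tuple(sorted(p)))
--         return out
--
--     return {
--         'train_val': pick(train, {'train', 'val'}),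
--         'train_test': pick(train, {'train', 'test'}),
--         'val_test': pick(val, {'val', 'test'}),
--         'all_splits': pick(train, {'train', 'val', 'test'}),
--     }
-- ===== Notes on version B (the rewrite author's own statement) =====
-- stated objective: alternative
-- what changed: Instead of materialising three normalized sets and intersecting them pairwise, B builds one dict mapping each normalized pair to the set of split names containing it, then fills each of the four results by scanning a single split and testing a superset condition on that index.
import Mathlib
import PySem

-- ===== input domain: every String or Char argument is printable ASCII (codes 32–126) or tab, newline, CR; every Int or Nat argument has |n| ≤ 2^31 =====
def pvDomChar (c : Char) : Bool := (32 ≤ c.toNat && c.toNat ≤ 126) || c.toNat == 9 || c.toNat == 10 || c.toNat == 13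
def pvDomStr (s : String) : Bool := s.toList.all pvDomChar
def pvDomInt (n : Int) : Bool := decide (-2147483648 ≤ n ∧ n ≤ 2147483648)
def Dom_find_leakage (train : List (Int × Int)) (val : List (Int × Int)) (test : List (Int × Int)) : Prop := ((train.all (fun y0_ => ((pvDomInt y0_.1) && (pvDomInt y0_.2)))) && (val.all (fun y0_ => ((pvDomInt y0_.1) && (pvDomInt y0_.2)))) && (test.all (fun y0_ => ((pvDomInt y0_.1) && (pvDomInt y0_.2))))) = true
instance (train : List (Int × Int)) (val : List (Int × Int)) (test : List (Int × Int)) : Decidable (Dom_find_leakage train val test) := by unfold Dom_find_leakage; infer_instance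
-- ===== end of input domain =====

-- B replaces A's three normalized sets and pairwise intersections by ONE dict indexing each
-- normalized pair with the set of split names containing it, plus per-split superset scans (objective: alternative).
-- The Python results hold sets, whose iteration order Python does not define; both ports use PySem.Set (first-insertion order).

-- ===== PORT A =====
-- tuple(sorted(pair)) on a 2-tuple: keep if already ordered, else swap
def normalize_pair (p : Int × Int) : Int × Int := if p.1 ≤ p.2 then (p.1, p.2) else (p.2, p.1)

def find_leakage (train : List (Int × Int)) (val : List (Int × Int)) (test : List (Int × Int)) : List (String × List (Int × Int)) :=
  let train_normalized := PySem.Set.ofList (train.map normalize_pair)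
  let val_normalized := PySem.Set.ofList (val.map normalize_pair)
  let test_normalized := PySem.Set.ofList (test.map normalize_pair)
  let train_val_leak := PySem.Set.inter train_normalized val_normalized
  let train_test_leak := PySem.Set.inter train_normalized test_normalized
  let val_test_leak := PySem.Set.inter val_normalized test_normalized
  let all_leak := PySem.Set.inter (PySem.Set.inter train_normalized val_normalized) test_normalized
  [("train_val", train_val_leak), ("train_test", train_test_leak),
   ("val_test", val_test_leak), ("all_splits", all_leak)]

-- ===== PORT B =====
-- tuple(sorted(p)), inlined in Source B
def pvNorm (p : Int × Int) : Int × Int := if p.1 ≤ p.2 then (p.1, p.2) else (p.2, p.1)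

-- flags[k] = flags.get(k, set()) | {name}, over the three labelled splits
def pvBuildFlags (train : List (Int × Int)) (val : List (Int × Int)) (test : List (Int × Int)) : PySem.Dict (Int × Int) (PySem.Set String) :=
  ([("train", train), ("val", val), ("test", test)] : List (String × List (Int × Int))).foldl
    (fun flags ns =>
      ns.2.foldl (fun flags p =>
        flags.insert (pvNorm p) (PySem.Set.union (flags.getD (pvNorm p) PySem.Set.empty) [ns.1])) flags)
    (PySem.Dict.empty)

-- pick(split, need): flags[k] always exists for a k coming from a split, so getD's default is never consulted
def pvPick (flags : PySem.Dict (Int × Int) (PySem.Set String)) (split : List (Int × Int)) (need : PySem.Set String) : PySem.Set (Int × Int) :=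
  split.foldl (fun out p =>
    if PySem.Set.issubset need (flags.getD (pvNorm p) PySem.Set.empty) then PySem.Set.add out (pvNorm p) else out)
    PySem.Set.empty

def find_leakage_alt (train : List (Int × Int)) (val : List (Int × Int)) (test : List (Int × Int)) : List (String × List (Int × Int)) :=
  let flags := pvBuildFlags train val test
  [("train_val", pvPick flags train ["train", "val"]),
   ("train_test", pvPick flags train ["train", "test"]),
   ("val_test", pvPick flags val ["val", "test"]),
   ("all_splits", pvPick flags train ["train", "val", "test"])]

-- ===== PRECONDITION & SPEC =====
def Spec_find_leakage (train : List (Int × Int)) (val : List (Int × Int)) (test : List (Int × Int)) (out : List (String × List (Int × Int))) : Prop := out = find_leakage_alt train val test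
instance (train : List (Int × Int)) (val : List (Int × Int)) (test : List (Int × Int)) (out : List (String × List (Int × Int))) : Decidable (Spec_find_leakage train val test out) := by unfold Spec_find_leakage; infer_instance

-- ===== CLAIM (what is proved, stated in full; the proofs are below) =====
def Claim_equal_find_leakage : Prop := ∀ (train : List (Int × Int)) (val : List (Int × Int)) (test : List (Int × Int)), Dom_find_leakage train val test → Spec_find_leakage train val test (find_leakage train val test)

-- ===== LEMMAS AND PROOFS =====

-- one pass of the flag-building loop, characterised by what getD returns afterwards
theorem getD_flag_pass (name : String) (xs : List (Int × Int)) (d : PySem.Dict (Int × Int) (PySem.Set String)) (k : Int × Int) :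
    (xs.foldl (fun flags p =>
        flags.insert (pvNorm p) (PySem.Set.union (flags.getD (pvNorm p) PySem.Set.empty) [name])) d).getD k PySem.Set.empty
    = if k ∈ xs.map pvNorm then PySem.Set.add (d.getD k PySem.Set.empty) name else d.getD k PySem.Set.empty := by
  induction xs generalizing d with
  | nil => simp
  | cons p rest ih =>
    simp only [List.foldl_cons, ih, List.map_cons, List.mem_cons]
    rw [PySem.Dict.getD_insert]
    by_cases hk : k = pvNorm p
    · subst hk
      by_cases hm : pvNorm p ∈ rest.map pvNorm
      · rw [if_pos hm]
        simp [PySem.Set.union, PySem.Set.update, PySem.Set.add_of_mem, PySem.Set.mem_add]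
      · rw [if_neg hm]
        simp [PySem.Set.union, PySem.Set.update]
    · rw [if_neg hk]
      by_cases hm : k ∈ rest.map pvNorm
      · simp [hm]
      · simp [hm, hk]

theorem mem_getD_buildFlags (train val test : List (Int × Int)) (k : Int × Int) (name : String)
    (hname : name = "train" ∨ name = "val" ∨ name = "test") :
    (name ∈ (pvBuildFlags train val test).getD k PySem.Set.empty) ↔
      ((name = "train" ∧ k ∈ train.map pvNorm) ∨ (name = "val" ∧ k ∈ val.map pvNorm) ∨ (name = "test" ∧ k ∈ test.map pvNorm)) := by
  unfold pvBuildFlags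
  simp only [List.foldl_cons, List.foldl_nil]
  rw [getD_flag_pass, getD_flag_pass, getD_flag_pass]
  have hempty : (PySem.Dict.empty : PySem.Dict (Int × Int) (PySem.Set String)).getD k PySem.Set.empty = PySem.Set.empty := by
    simp [PySem.Dict.empty, PySem.Dict.getD, PySem.Dict.get?, PySem.Set.empty]
  rw [hempty]
  by_cases ht : k ∈ train.map pvNorm <;> by_cases hv : k ∈ val.map pvNorm <;> by_cases he : k ∈ test.map pvNorm <;>
    rcases hname with rfl | rfl | rfl <;>
      simp [ht, hv, he, PySem.Set.empty]

-- pvPick with a pointwise-known condition is ofList of a filtered map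
theorem pick_eq_ofList_filter (flags : PySem.Dict (Int × Int) (PySem.Set String))
    (split : List (Int × Int)) (need : PySem.Set String) (q : (Int × Int) → Bool)
    (h : ∀ p ∈ split, PySem.Set.issubset need (flags.getD (pvNorm p) PySem.Set.empty) = q (pvNorm p)) :
    pvPick flags split need = PySem.Set.ofList ((split.map pvNorm).filter q) := by
  unfold pvPick
  rw [PySem.List.foldl_congr_mem split _ (fun out p => if q (pvNorm p) then PySem.Set.add out (pvNorm p) else out) _
    (by intro acc x hx; rw [h x hx])]
  rw [PySem.Set.ofList_eq_foldl, List.foldl_filter, List.foldl_map]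
  rfl

-- Set.ofList commutes with filter (first-occurrence dedup keeps relative order)
theorem foldl_add_filter (q : (Int × Int) → Bool) (xs s : List (Int × Int)) :
    (xs.filter q).foldl PySem.Set.add (s.filter q) = (xs.foldl PySem.Set.add s).filter q := by
  induction xs generalizing s with
  | nil => rfl
  | cons x rest ih =>
    by_cases hq : q x
    · rw [List.filter_cons_of_pos hq, List.foldl_cons, List.foldl_cons]
      have : PySem.Set.add (s.filter q) x = (PySem.Set.add s x).filter q := by
        rw [PySem.Set.add_eq_ite, PySem.Set.add_eq_ite]
        by_cases hs : x ∈ s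
        · rw [if_pos hs, if_pos (by simp [List.mem_filter, hs, hq])]
        · rw [if_neg hs, if_neg (by simp [List.mem_filter, hs]), List.filter_append,
            List.filter_cons_of_pos hq, List.filter_nil]
      rw [this, ih]
    · rw [List.filter_cons_of_neg (by simpa using hq), List.foldl_cons]
      have : (PySem.Set.add s x).filter q = s.filter q := by
        rw [PySem.Set.add_eq_ite]
        by_cases hs : x ∈ s
        · rw [if_pos hs]
        · rw [if_neg hs, List.filter_append, List.filter_cons_of_neg (by simpa using hq), List.filter_nil, List.append_nil]
      rw [← this, ih]

theorem ofList_filter (q : (Int × Int) → Bool) (xs : List (Int × Int)) :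
    PySem.Set.ofList (xs.filter q) = (PySem.Set.ofList xs).filter q := by
  rw [PySem.Set.ofList_eq_foldl, PySem.Set.ofList_eq_foldl]
  simpa using foldl_add_filter q xs []

-- the three membership flags stored for a key, read back through getD
theorem flags_cond (train val test : List (Int × Int)) (p : Int × Int) :
    ("train" ∈ (pvBuildFlags train val test).getD (pvNorm p) PySem.Set.empty ↔ pvNorm p ∈ train.map pvNorm)
    ∧ ("val" ∈ (pvBuildFlags train val test).getD (pvNorm p) PySem.Set.empty ↔ pvNorm p ∈ val.map pvNorm)
    ∧ ("test" ∈ (pvBuildFlags train val test).getD (pvNorm p) PySem.Set.empty ↔ pvNorm p ∈ test.map pvNorm) := by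
  refine ⟨?_, ?_, ?_⟩ <;> rw [mem_getD_buildFlags _ _ _ _ _ (by tauto)] <;> simp

theorem find_leakage_spec : Claim_equal_find_leakage := by
  intro train val test _
  unfold Spec_find_leakage
  simp only [find_leakage, find_leakage_alt]
  have hnp : normalize_pair = pvNorm := rfl
  rw [hnp]
  -- train_val
  have h1 : pvPick (pvBuildFlags train val test) train ["train", "val"]
      = PySem.Set.inter (PySem.Set.ofList (train.map pvNorm)) (PySem.Set.ofList (val.map pvNorm)) := by
    rw [pick_eq_ofList_filter _ _ _ (fun k => decide (k ∈ val.map pvNorm)) ?_]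
    · rw [ofList_filter]
      unfold PySem.Set.inter
      exact List.filter_congr (by intro k _; simp [PySem.Set.mem_ofList])
    · intro p hp
      rw [Bool.eq_iff_iff]
      simp only [PySem.Set.issubset, List.all_cons, List.all_nil, Bool.and_true, Bool.and_eq_true,
        PySem.Set.contains_iff, decide_eq_true_iff,
        (flags_cond train val test p).1, (flags_cond train val test p).2.1]
      exact and_iff_right (List.mem_map_of_mem hp)
  -- train_test
  have h2 : pvPick (pvBuildFlags train val test) train ["train", "test"]
      = PySem.Set.inter (PySem.Set.ofList (train.map pvNorm)) (PySem.Set.ofList (test.map pvNorm)) := by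
    rw [pick_eq_ofList_filter _ _ _ (fun k => decide (k ∈ test.map pvNorm)) ?_]
    · rw [ofList_filter]
      unfold PySem.Set.inter
      exact List.filter_congr (by intro k _; simp [PySem.Set.mem_ofList])
    · intro p hp
      rw [Bool.eq_iff_iff]
      simp only [PySem.Set.issubset, List.all_cons, List.all_nil, Bool.and_true, Bool.and_eq_true,
        PySem.Set.contains_iff, decide_eq_true_iff,
        (flags_cond train val test p).1, (flags_cond train val test p).2.2]
      exact and_iff_right (List.mem_map_of_mem hp)
  -- val_test
  have h3 : pvPick (pvBuildFlags train val test) val ["val", "test"]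
      = PySem.Set.inter (PySem.Set.ofList (val.map pvNorm)) (PySem.Set.ofList (test.map pvNorm)) := by
    rw [pick_eq_ofList_filter _ _ _ (fun k => decide (k ∈ test.map pvNorm)) ?_]
    · rw [ofList_filter]
      unfold PySem.Set.inter
      exact List.filter_congr (by intro k _; simp [PySem.Set.mem_ofList])
    · intro p hp
      rw [Bool.eq_iff_iff]
      simp only [PySem.Set.issubset, List.all_cons, List.all_nil, Bool.and_true, Bool.and_eq_true,
        PySem.Set.contains_iff, decide_eq_true_iff,
        (flags_cond train val test p).2.1, (flags_cond train val test p).2.2]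
      exact and_iff_right (List.mem_map_of_mem hp)
  -- all_splits
  have h4 : pvPick (pvBuildFlags train val test) train ["train", "val", "test"]
      = PySem.Set.inter (PySem.Set.inter (PySem.Set.ofList (train.map pvNorm)) (PySem.Set.ofList (val.map pvNorm))) (PySem.Set.ofList (test.map pvNorm)) := by
    rw [pick_eq_ofList_filter _ _ _ (fun k => decide (k ∈ test.map pvNorm) && decide (k ∈ val.map pvNorm)) ?_]
    · rw [ofList_filter]
      unfold PySem.Set.inter
      rw [List.filter_filter]
      refine List.filter_congr (by intro k _; rw [Bool.eq_iff_iff]; simp [PySem.Set.mem_ofList])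
    · intro p hp
      rw [Bool.eq_iff_iff]
      simp only [PySem.Set.issubset, List.all_cons, List.all_nil, Bool.and_true, Bool.and_eq_true,
        PySem.Set.contains_iff, decide_eq_true_iff,
        (flags_cond train val test p).1, (flags_cond train val test p).2.1, (flags_cond train val test p).2.2]
      exact ⟨fun h => ⟨h.2.2, h.2.1⟩, fun h => ⟨List.mem_map_of_mem hp, h.2, h.1⟩⟩
  rw [h1, h2, h3, h4]
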